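-- pv_equiv track=rewrite | github.com/qsr10250030/exam | s1.py | get_max_min_sum
-- ===== SOURCE A (Python) =====
-- def get_max_min_sum(array, n):
--     s = set(array)
--     ln = len(s)
--     sum =0
--     if n > ln:
--         return -1
--     l = list(s)
--     array = sorted(l)
--     min_n = array[0: n]
--     max_n = array[ln - n: ln]
--     except_flag = bool(set(min_n) & set(max_n))
--     if except_flag:
--         return -1
--
--     for item in min_n:
--         sum += item
--     for item in max_n:
--         sum += item
--     return sum
-- ===== SOURCE B (Python) =====
-- def get_max_min_sum(array, n):
--     distinct = set(array)
--     ln = len(distinct)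
--     if 2 * n > ln:
--         return -1
--     total = 0
--     for v in distinct:
--         r = sum(1 for u in distinct if u < v)
--         if r < n or r >= ln - n:
--             total += v
--     return total
-- ===== Notes on version B (the rewrite author's own statement) =====
-- stated objective: alternative
-- what changed: B replaces A's sort-then-slice-then-set-intersection approach by rank counting over the distinct values (keep v iff fewer than n distinct values are below it, or at least ln-n are), with the overlap test done arithmetically as 2n>ln; Pre_ excludes negative n, outside the task's natural meaning of a count, where A's value is an accident of Python's negative-slice semantics.
-- outside the precondition, e.g. on get_max_min_sum([1, 2, 3], -1): A returns 3, B returns 0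
import Mathlib
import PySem

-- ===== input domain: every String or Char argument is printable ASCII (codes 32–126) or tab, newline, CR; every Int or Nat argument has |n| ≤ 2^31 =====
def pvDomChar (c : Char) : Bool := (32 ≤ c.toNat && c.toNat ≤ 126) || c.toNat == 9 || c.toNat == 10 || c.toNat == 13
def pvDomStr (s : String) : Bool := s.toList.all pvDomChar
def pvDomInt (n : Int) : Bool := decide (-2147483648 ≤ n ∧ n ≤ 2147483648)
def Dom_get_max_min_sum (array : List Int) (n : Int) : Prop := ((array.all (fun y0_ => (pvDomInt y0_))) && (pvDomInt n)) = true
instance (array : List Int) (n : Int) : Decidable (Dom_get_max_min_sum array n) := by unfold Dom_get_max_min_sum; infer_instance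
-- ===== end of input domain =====

-- B replaces A's sort/slice/set-intersection by rank counting over the distinct values;
-- an alternative algorithm of similar cost, not claimed faster.

-- ===== PORT A =====
def get_max_min_sum (array : List Int) (n : Int) : Int :=
  let s := PySem.Set.ofList array
  let ln : Int := PySem.Set.len s
  let sum0 : Int := 0
  if n > ln then -1 else
    -- l = list(s); array = sorted(l): sorting the set's elements (identity key, order-independent)
    let arr := PySem.List.sorted s (fun x => x) false
    let min_n := PySem.List.slice arr (some 0) (some n)
    let max_n := PySem.List.slice arr (some (ln - n)) (some ln)
    let except_flag := !(PySem.Set.inter (PySem.Set.ofList min_n) (PySem.Set.ofList max_n)).isEmpty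
    if except_flag then -1 else
      let sum1 := min_n.foldl (fun acc item => acc + item) sum0
      let sum2 := max_n.foldl (fun acc item => acc + item) sum1
      sum2

-- ===== PORT B =====
def get_max_min_sum_alt (array : List Int) (n : Int) : Int :=
  let distinct := PySem.Set.ofList array
  let ln : Int := PySem.Set.len distinct
  if 2 * n > ln then -1 else
    distinct.foldl (fun total v =>
      let r := distinct.foldl (fun r u => if u < v then r + 1 else r) (0 : Int)
      if r < n ∨ r ≥ ln - n then total + v else total) 0

-- ===== PRECONDITION & SPEC =====
-- Pre_ excludes negative n, outside the task's natural meaning of a count, where A's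
-- returned value is an accident of Python's negative-slice semantics.
def Pre_get_max_min_sum (array : List Int) (n : Int) : Prop := 0 ≤ n
instance (array : List Int) (n : Int) : Decidable (Pre_get_max_min_sum array n) := by unfold Pre_get_max_min_sum; infer_instance
def pvWitness_get_max_min_sum : List Int × Int := ([3, 1, 2, 5], 1)

def Spec_get_max_min_sum (array : List Int) (n : Int) (out : Int) : Prop := out = get_max_min_sum_alt array n
instance (array : List Int) (n : Int) (out : Int) : Decidable (Spec_get_max_min_sum array n out) := by unfold Spec_get_max_min_sum; infer_instance

-- ===== CLAIM (what is proved, stated in full; the proofs are below) =====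
def Claim_equal_get_max_min_sum : Prop := ∀ (array : List Int) (n : Int), Dom_get_max_min_sum array n → Pre_get_max_min_sum array n → Spec_get_max_min_sum array n (get_max_min_sum array n)

-- ===== LEMMAS AND PROOFS =====

-- the loop 'for v in l: if c v < lo or c v >= hi: total += v' is the sum of a conditional map
theorem pv_foldl_cond_add (c : Int → Int) (lo hi : Int) (l : List Int) (a : Int) :
    l.foldl (fun acc v => if c v < lo ∨ c v ≥ hi then acc + v else acc) a
      = a + (l.map (fun v => if c v < lo ∨ c v ≥ hi then v else 0)).sum := by
  induction l generalizing a with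
  | nil => simp
  | cons x t ih =>
    by_cases hp : c x < lo ∨ c x ≥ hi
    · simp [hp, ih, add_assoc]
    · simp [hp, ih]

-- core: on a strictly increasing list, summing the values whose rank (number of
-- smaller elements) is < lo or ≥ hi is the sum of a front take plus a back drop
theorem pv_rank_sum (d : List Int) (hd : d.Pairwise (· < ·)) (lo hi : Int) (hlh : lo ≤ hi) :
    (d.map (fun v =>
        if ((d.countP (fun u => decide (u < v)) : Int) < lo ∨
            (d.countP (fun u => decide (u < v)) : Int) ≥ hi) then v else 0)).sum
      = (d.take lo.toNat).sum + (d.drop hi.toNat).sum := by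
  induction d generalizing lo hi with
  | nil => simp
  | cons v t ih =>
    rw [List.pairwise_cons] at hd
    obtain ⟨hv, ht⟩ := hd
    have hrv : (v :: t).countP (fun u => decide (u < v)) = 0 := by
      rw [List.countP_eq_zero]
      intro a ha
      rcases List.mem_cons.mp ha with h | h
      · simp [h]
      · simp [not_lt_of_gt (hv a h)]
    have hmap : (t.map (fun w =>
        if (((v :: t).countP (fun u => decide (u < w)) : Int) < lo ∨
            ((v :: t).countP (fun u => decide (u < w)) : Int) ≥ hi) then w else 0))
        = (t.map (fun w =>
        if ((t.countP (fun u => decide (u < w)) : Int) < lo - 1 ∨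
            (t.countP (fun u => decide (u < w)) : Int) ≥ hi - 1) then w else 0)) := by
      apply List.map_congr_left
      intro w hw
      have hc : (v :: t).countP (fun u => decide (u < w)) = t.countP (fun u => decide (u < w)) + 1 := by
        rw [List.countP_cons]
        simp [hv w hw]
      rw [hc]
      have : ((t.countP (fun u => decide (u < w)) + 1 : Nat) : Int) < lo ∨
             ((t.countP (fun u => decide (u < w)) + 1 : Nat) : Int) ≥ hi ↔
             ((t.countP (fun u => decide (u < w)) : Nat) : Int) < lo - 1 ∨
             ((t.countP (fun u => decide (u < w)) : Nat) : Int) ≥ hi - 1 := by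
        push_cast; omega
      rw [if_congr this rfl rfl]
    have hih := ih ht (lo - 1) (hi - 1) (by omega)
    rw [List.map_cons, List.sum_cons, hrv, hmap, hih]
    by_cases hlo : 0 < lo
    · have h1 : lo.toNat = (lo - 1).toNat + 1 := by omega
      have h2 : hi.toNat = (hi - 1).toNat + 1 := by omega
      have hcond : ((0 : Nat) : Int) < lo ∨ ((0 : Nat) : Int) ≥ hi := Or.inl (by exact_mod_cast hlo)
      rw [if_pos hcond, h1, h2]
      simp [List.take_succ_cons, List.drop_succ_cons, add_assoc]
    · have h1 : lo.toNat = 0 := by omega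
      have h1' : (lo - 1).toNat = 0 := by omega
      by_cases hhi : 0 < hi
      · have h2 : hi.toNat = (hi - 1).toNat + 1 := by omega
        have hcond : ¬ (((0 : Nat) : Int) < lo ∨ ((0 : Nat) : Int) ≥ hi) := by push_cast; omega
        rw [if_neg hcond, h1, h1', h2]
        simp [List.drop_succ_cons]
      · have h2 : hi.toNat = 0 := by omega
        have h2' : (hi - 1).toNat = 0 := by omega
        have hcond : ((0 : Nat) : Int) < lo ∨ ((0 : Nat) : Int) ≥ hi := Or.inr (by push_cast; omega)
        rw [if_pos hcond, h1, h1', h2, h2']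
        simp [add_comm]

-- a front take and a back drop of a nodup list are disjoint when the cut points are ordered
theorem pv_take_drop_disjoint (d : List Int) (hnd : d.Nodup) (a b : Nat) (hab : a ≤ b)
    (x : Int) (hx1 : x ∈ d.take a) (hx2 : x ∈ d.drop b) : False := by
  have hsplit : d.take b ++ d.drop b = d := List.take_append_drop b d
  have hnd' : (d.take b ++ d.drop b).Nodup := by rw [hsplit]; exact hnd
  have hdisj := (List.nodup_append.mp hnd').2.2
  have hx1' : x ∈ d.take b := by
    have : d.take a = (d.take b).take a := by rw [List.take_take, min_eq_left hab]
    exact List.take_subset a _ (this ▸ hx1)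
  exact hdisj x hx1' x hx2 rfl

theorem pv_main (array : List Int) (n : Int) (hn : 0 ≤ n) :
    get_max_min_sum array n = get_max_min_sum_alt array n := by
  unfold get_max_min_sum get_max_min_sum_alt
  simp only []
  set s := PySem.Set.ofList array with hs
  have hnds : s.Nodup := PySem.Set.nodup_ofList array
  set d := PySem.List.sorted s (fun x => x) false with hdd
  have hperm : d.Perm s := PySem.List.sorted_perm s (fun x => x) false
  have hnd : d.Nodup := hperm.nodup_iff.mpr hnds
  have hpl : d.Pairwise (· < ·) := PySem.List.sorted_ofList_pairwise_lt array
  have hlen : PySem.Set.len s = (d.length : Int) := by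
    simp [PySem.Set.len, hperm.length_eq]
  rw [hlen]
  by_cases h1 : n > (d.length : Int)
  · rw [if_pos h1, if_pos (by omega)]
  rw [if_neg h1]
  have hnL : n ≤ (d.length : Int) := not_lt.mp h1
  -- slice characterizations (0 ≤ n throughout)
  have hmin : PySem.List.slice d (some 0) (some n) = d.take n.toNat := by
    rw [PySem.List.slice_zero_start, PySem.List.slice_to d hn]
  have hmax : PySem.List.slice d (some ((d.length : Int) - n)) (some (d.length : Int))
      = d.drop (d.length - n.toNat) := by
    rw [PySem.List.slice_toNat d (by omega) (by omega)]
    have e1 : ((d.length : Int) - n).toNat = d.length - n.toNat := by omega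
    have e2 : ((d.length : Int)).toNat = d.length := by omega
    rw [e1, e2]
    have e3 : d.length - (d.length - n.toNat) = n.toNat := by omega
    rw [e3]
    apply List.take_of_length_le
    simp
    omega
  by_cases hov : 2 * n > (d.length : Int)
  · -- overlap: both sides return -1
    rw [if_pos hov]
    have hnpos : 0 < n := by omega
    have hb : d.length - n.toNat < d.length := by omega
    set x := d[d.length - n.toNat]'hb with hx
    have hx1 : x ∈ PySem.List.slice d (some 0) (some n) := by
      rw [hmin]
      have hlt : d.length - n.toNat < n.toNat := by omega
      have : (d.take n.toNat)[d.length - n.toNat]'(by simp; omega) = x := by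
        simp [List.getElem_take, hx]
      exact this ▸ List.getElem_mem _
    have hx2 : x ∈ PySem.List.slice d (some ((d.length : Int) - n)) (some (d.length : Int)) := by
      rw [hmax]
      have : (d.drop (d.length - n.toNat))[0]'(by simp; omega) = x := by
        simp [List.getElem_drop, hx]
      exact this ▸ List.getElem_mem _
    have hne : (PySem.Set.inter (PySem.Set.ofList (PySem.List.slice d (some 0) (some n)))
        (PySem.Set.ofList (PySem.List.slice d (some ((d.length : Int) - n)) (some (d.length : Int))))) ≠ [] := by
      apply List.ne_nil_of_mem (a := x)
      rw [PySem.Set.mem_inter]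
      exact ⟨(PySem.Set.mem_ofList _ _).mpr hx1, (PySem.Set.mem_ofList _ _).mpr hx2⟩
    rw [if_pos (by simpa using hne)]
  · -- no overlap: both sides return the sum
    rw [if_neg hov]
    have hflag : (PySem.Set.inter (PySem.Set.ofList (PySem.List.slice d (some 0) (some n)))
        (PySem.Set.ofList (PySem.List.slice d (some ((d.length : Int) - n)) (some (d.length : Int))))) = [] := by
      rw [List.eq_nil_iff_forall_not_mem]
      intro x hxm
      rw [PySem.Set.mem_inter] at hxm
      obtain ⟨hx1, hx2⟩ := hxm
      rw [PySem.Set.mem_ofList] at hx1 hx2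
      rw [hmin] at hx1
      rw [hmax] at hx2
      exact pv_take_drop_disjoint d hnd n.toNat (d.length - n.toNat) (by omega) x hx1 hx2
    rw [if_neg (by rw [hflag]; simp)]
    -- A's two accumulation loops are sums over the two slices
    rw [PySem.List.foldl_add _ (fun x => x), PySem.List.foldl_add _ (fun x => x)]
    simp only [List.map_id_fun', id, zero_add]
    -- B's loop: inner rank loop, then the conditional accumulation
    rw [pv_foldl_cond_add (c := fun v => s.foldl (fun r u => if u < v then r + 1 else r) 0)]
    simp only [PySem.List.foldl_ite_add_one (p := fun u => u < _), zero_add]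
    simp only [← hperm.countP_eq]
    rw [← (hperm.map _).sum_eq]
    -- apply the rank characterization
    have hlh : n ≤ (d.length : Int) - n := by omega
    rw [pv_rank_sum d hpl n ((d.length : Int) - n) hlh]
    rw [hmin, hmax]
    have e1 : ((d.length : Int) - n).toNat = d.length - n.toNat := by omega
    rw [e1]

-- ===== VERDICT (by name: the statement is the Claim_ definition above) =====
theorem get_max_min_sum_spec : Claim_equal_get_max_min_sum := by
  intro array n _ hpre
  unfold Spec_get_max_min_sum
  exact pv_main array n hpre
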